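-- pv_equiv track=rewrite | github.com/DEFRA/ai-eu-trade-accelerator | judit/packages/pipeline/src/judit_pipeline/equine_source_universe.py | cluster_counts_by_ui_cluster
-- ===== SOURCE A (Python) =====
-- from typing import Any, Literal
--
-- def cluster_counts_by_ui_cluster(universe: dict[str, Any]) -> dict[str, int]:
--     counts: dict[str, int] = {}
--     for row in universe.get("instruments") or []:
--         if not isinstance(row, dict):
--             continue
--         k = str(row.get("ui_cluster") or "unknown").strip() or "unknown"
--         counts[k] = counts.get(k, 0) + 1
--     return dict(sorted(counts.items()))
-- ===== SOURCE B (Python) =====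
-- def cluster_counts_by_ui_cluster(universe):
--     keys = sorted(
--         str(row.get("ui_cluster") or "unknown").strip() or "unknown"
--         for row in (universe.get("instruments") or [])
--         if isinstance(row, dict)
--     )
--     result = {}
--     i, n = 0, len(keys)
--     while i < n:
--         j = i + 1
--         while j < n and keys[j] == keys[i]:
--             j += 1
--         result[keys[i]] = j - i
--         i = j
--     return result
-- ===== Notes on version B (the rewrite author's own statement) =====
-- stated objective: alternative
-- what changed: Replaces A's hash-counter-then-sort-items strategy by sorting the full list of normalized keys and counting consecutive runs of equal keys in one scan, emitting the result directly in sorted order.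
import Mathlib
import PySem

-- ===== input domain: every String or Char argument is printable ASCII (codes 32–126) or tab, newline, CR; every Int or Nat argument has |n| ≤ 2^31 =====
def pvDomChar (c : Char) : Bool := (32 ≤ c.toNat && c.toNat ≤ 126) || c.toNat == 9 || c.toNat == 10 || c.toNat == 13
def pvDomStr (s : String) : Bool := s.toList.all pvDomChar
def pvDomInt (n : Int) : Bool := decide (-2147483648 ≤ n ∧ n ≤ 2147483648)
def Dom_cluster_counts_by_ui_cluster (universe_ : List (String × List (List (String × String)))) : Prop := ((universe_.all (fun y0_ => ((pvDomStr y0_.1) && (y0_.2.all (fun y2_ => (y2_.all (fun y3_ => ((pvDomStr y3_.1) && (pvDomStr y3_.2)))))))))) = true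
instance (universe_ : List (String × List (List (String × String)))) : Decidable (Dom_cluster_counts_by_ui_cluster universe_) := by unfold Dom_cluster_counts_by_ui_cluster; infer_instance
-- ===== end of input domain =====

-- B sorts all normalized keys and counts consecutive runs in one scan, instead of A's
-- hash-counter-then-sort-items; same return value, a genuinely different traversal (objective: alternative).

-- shared key normalization: str(row.get("ui_cluster") or "unknown").strip() or "unknown"
-- (identical expression in both Pythons; the value is already a str, so str() is the identity)
def pvNormKey (row : List (String × String)) : String :=
  let s := match (PySem.Dict.mk row).get? "ui_cluster" with
           | none => "unknown"
           | some v => if v == "" then "unknown" else v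
  let t := PySem.Str.strip s
  if t == "" then "unknown" else t

-- ===== PORT A =====
-- the `isinstance(row, dict)` guard is vacuous under the type convention (every row IS a dict)
def cluster_counts_by_ui_cluster (universe_ : List (String × List (List (String × String)))) : List (String × Int) :=
  let rows := ((PySem.Dict.mk universe_).get? "instruments").getD []
  let counts := rows.foldl (fun d row =>
    let k := pvNormKey row
    d.insert k (d.getD k 0 + 1)) PySem.Dict.empty
  PySem.List.sorted2 counts.items (fun p => p.1) (fun p => p.2)

-- ===== PORT B =====
-- the outer while loop of Source B, as recursion on the remaining suffix of the sorted key list;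
-- the inner `while keys[j] == keys[i]` scan is the takeWhile/dropWhile split
def pvRuns : List String → List (String × Int)
  | [] => []
  | k :: t =>
    (k, 1 + ((t.takeWhile (· == k)).length : Int)) :: pvRuns (t.dropWhile (· == k))
termination_by l => l.length
decreasing_by
  simp only [List.length_cons]
  exact Nat.lt_succ_of_le (List.length_dropWhile_le _ _)

def cluster_counts_by_ui_cluster_alt (universe_ : List (String × List (List (String × String)))) : List (String × Int) :=
  let rows := ((PySem.Dict.mk universe_).get? "instruments").getD []
  let keys := PySem.List.sorted (rows.map pvNormKey) (fun k => k)
  pvRuns keys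

-- ===== PRECONDITION & SPEC =====
def Spec_cluster_counts_by_ui_cluster (universe_ : List (String × List (List (String × String)))) (out : List (String × Int)) : Prop := out = cluster_counts_by_ui_cluster_alt universe_
instance (universe_ : List (String × List (List (String × String)))) (out : List (String × Int)) : Decidable (Spec_cluster_counts_by_ui_cluster universe_ out) := by unfold Spec_cluster_counts_by_ui_cluster; infer_instance

-- ===== CLAIM (what is proved, stated in full; the proofs are below) =====
def Claim_equal_cluster_counts_by_ui_cluster : Prop := ∀ (universe_ : List (String × List (List (String × String)))), Dom_cluster_counts_by_ui_cluster universe_ → Spec_cluster_counts_by_ui_cluster universe_ (cluster_counts_by_ui_cluster universe_)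

-- ===== LEMMAS AND PROOFS =====

theorem pv_insertBy_congr {α : Type} (f g : α → α → Bool) (x : α) (acc : List α)
    (h : ∀ b ∈ acc, f x b = g x b) :
    PySem.List.insertBy f x acc = PySem.List.insertBy g x acc := by
  induction acc with
  | nil => rfl
  | cons y ys ih =>
    simp only [PySem.List.insertBy]
    rw [h y (by simp)]
    split
    · rfl
    · rw [ih (fun b hb => h b (by simp [hb]))]

theorem pv_foldl_insertBy_congr {α : Type} (f g : α → α → Bool) (xs : List α) (acc : List α)
    (h : ∀ a ∈ xs, ∀ b, (b ∈ xs ∨ b ∈ acc) → f a b = g a b) :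
    xs.foldl (fun acc x => PySem.List.insertBy f x acc) acc
      = xs.foldl (fun acc x => PySem.List.insertBy g x acc) acc := by
  induction xs generalizing acc with
  | nil => rfl
  | cons x t ih =>
    simp only [List.foldl_cons]
    rw [pv_insertBy_congr f g x acc (fun b hb => h x (by simp) b (Or.inr hb))]
    exact ih _ (fun a ha b hb => by
      refine h a (by simp [ha]) b ?_
      rcases hb with hb | hb
      · exact Or.inl (by simp [hb])
      · rcases (PySem.List.mem_insertBy g x b acc).1 hb with hb | hb
        · exact Or.inl (by simp [hb])
        · exact Or.inr hb)

-- sorted2 on a list of pairs with pairwise-distinct first components is sorted by the first component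
theorem pv_sorted2_eq_sorted_fst (xs : List (String × Int))
    (h : ∀ a ∈ xs, ∀ b ∈ xs, a ≠ b → a.1 ≠ b.1) :
    PySem.List.sorted2 xs (fun p => p.1) (fun p => p.2)
      = PySem.List.sorted xs (fun p => p.1) := by
  show xs.foldl (fun acc x => PySem.List.insertBy _ x acc) []
      = xs.foldl (fun acc x => PySem.List.insertBy _ x acc) []
  apply pv_foldl_insertBy_congr
  intro a ha b hb
  rcases hb with hb | hb
  · by_cases hab : a = b
    · subst hab; simp
    · have hfst := h a ha b hb hab
      rcases lt_trichotomy a.1 b.1 with hlt | heq | hgt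
      · simp [hlt, not_lt.2 (le_of_lt hlt)]
      · exact absurd heq hfst
      · simp [hgt, not_lt.2 (le_of_lt hgt)]
  · simp at hb

-- foldl of Set.add over a suffix r with k already in the accumulator head, k ∉ r
theorem pv_foldl_add_cons (r : List String) (k : String) (s : List String)
    (hk : k ∉ r) :
    r.foldl PySem.Set.add (k :: s) = k :: r.foldl PySem.Set.add s := by
  induction r generalizing s with
  | nil => rfl
  | cons x t ih =>
    have hxk : ¬ (x = k) := fun h => hk (by simp [h])
    simp only [List.foldl_cons]
    have hadd : PySem.Set.add (k :: s) x = k :: PySem.Set.add s x := by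
      simp [PySem.Set.add, PySem.Set.contains, hxk]
      split <;> simp_all
    rw [hadd]
    exact ih _ (fun h => hk (List.mem_cons_of_mem _ h))

theorem pv_ofList_eq_foldl_add (l : List String) :
    PySem.Set.ofList l = l.foldl PySem.Set.add [] := by
  rw [PySem.Set.ofList_eq_foldl]

-- dropWhile of a Pairwise (≤) list of strings: the dropped-at key does not reappear
theorem pv_not_mem_dropWhile (k : String) (t : List String)
    (hp : t.Pairwise (· ≤ ·)) (hk : ∀ x ∈ t, k ≤ x) :
    k ∉ t.dropWhile (· == k) := by
  induction t with
  | nil => simp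
  | cons x s ih =>
    by_cases hxk : x = k
    · subst hxk
      rw [List.dropWhile_cons_of_pos (by simp)]
      exact ih hp.of_cons (fun y hy => hk y (by simp [hy]))
    · rw [List.dropWhile_cons_of_neg (by simp [hxk])]
      intro hmem
      rcases List.mem_cons.1 hmem with h | h
      · exact hxk h.symm
      · have hkx : k < x := lt_of_le_of_ne (hk x (by simp)) (fun h' => hxk h'.symm)
        have hxle : x ≤ k := List.rel_of_pairwise_cons hp h
        exact absurd (lt_of_lt_of_le hkx hxle) (lt_irrefl k)

-- runs of a sorted list = first-occurrence distinct elements paired with their counts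
theorem pv_runs_eq (l : List String) (hp : l.Pairwise (· ≤ ·)) :
    pvRuns l = (PySem.Set.ofList l).map (fun k => (k, (l.count k : Int))) := by
  induction l using pvRuns.induct with
  | case1 => simp [pvRuns, PySem.Set.ofList]
  | case2 k t ih =>
    have hsplit : t = t.takeWhile (· == k) ++ t.dropWhile (· == k) :=
      (List.takeWhile_append_dropWhile).symm
    have hk : ∀ x ∈ t, k ≤ x := fun x hx => List.rel_of_pairwise_cons hp hx
    have hknot : k ∉ t.dropWhile (· == k) := pv_not_mem_dropWhile k t hp.of_cons hk
    have htake : ∀ x ∈ t.takeWhile (· == k), x = k := by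
      intro x hx
      have := List.mem_takeWhile_imp hx
      simpa using this
    have hdp : (t.dropWhile (· == k)).Pairwise (· ≤ ·) :=
      hp.of_cons.sublist (List.dropWhile_sublist _)
    rw [pvRuns, ih hdp]
    -- Set.ofList (k :: t) = k :: Set.ofList (dropWhile)
    have hof : PySem.Set.ofList (k :: t)
        = k :: PySem.Set.ofList (t.dropWhile (· == k)) := by
      rw [pv_ofList_eq_foldl_add, pv_ofList_eq_foldl_add]
      conv_lhs => rw [hsplit]
      simp only [List.foldl_cons, List.foldl_append]
      have h0 : PySem.Set.add ([] : List String) k = [k] := by rfl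
      rw [h0]
      have htk : (t.takeWhile (· == k)).foldl PySem.Set.add [k] = [k] := by
        generalize htake' : t.takeWhile (· == k) = m at htake ⊢
        clear htake' hsplit hknot hdp ih
        induction m with
        | nil => rfl
        | cons y ys ihm =>
          have hy : y = k := htake y (by simp)
          subst hy
          simp only [List.foldl_cons]
          have : PySem.Set.add [y] y = [y] := by simp [PySem.Set.add, PySem.Set.contains]
          rw [this]
          exact ihm (fun x hx => htake x (by simp [hx]))
      rw [htk]
      exact pv_foldl_add_cons _ k [] hknot
    rw [hof, List.map_cons]
    congr 1
    · -- head: count k (k :: t) = 1 + (takeWhile).length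
      have hcount : (k :: t).count k = 1 + (t.takeWhile (· == k)).length := by
        rw [List.count_cons_self]
        conv_lhs => rw [hsplit]
        rw [List.count_append]
        have h1 : (t.takeWhile (· == k)).count k = (t.takeWhile (· == k)).length :=
          List.count_eq_length.2 (fun x hx => by simp [htake x hx])
        have h2 : (t.dropWhile (· == k)).count k = 0 :=
          List.count_eq_zero.2 hknot
        omega
      simp [hcount]
    · -- tail: counts over dropWhile agree with counts over k :: t
      apply List.map_congr_left
      intro x hx
      have hxmem : x ∈ t.dropWhile (· == k) := (PySem.Set.mem_ofList _ _).1 hx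
      have hxk : x ≠ k := fun h => hknot (h ▸ hxmem)
      have hc : (k :: t).count x = (t.dropWhile (· == k)).count x := by
        rw [List.count_cons, if_neg (by simpa using hxk.symm)]
        simp only [Nat.add_zero]
        conv_lhs => rw [hsplit]
        rw [List.count_append]
        have : (t.takeWhile (· == k)).count x = 0 :=
          List.count_eq_zero.2 (fun hmem => hxk (htake x hmem))
        omega
      simp [hc]

-- ===== VERDICT (by name: the statement is the Claim_ definition above) =====
theorem cluster_counts_by_ui_cluster_spec : Claim_equal_cluster_counts_by_ui_cluster := by
  intro universe_ _
  show cluster_counts_by_ui_cluster universe_ = cluster_counts_by_ui_cluster_alt universe_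
  unfold cluster_counts_by_ui_cluster cluster_counts_by_ui_cluster_alt
  dsimp only
  set rows := ((PySem.Dict.mk universe_).get? "instruments").getD [] with hrows
  set ks := rows.map pvNormKey with hks
  -- A's counter loop over rows is Counter(ks)
  have hcounter : rows.foldl (fun d row =>
      let k := pvNormKey row
      d.insert k (d.getD k 0 + 1)) PySem.Dict.empty = PySem.Dict.counter ks := by
    rw [hks, ← PySem.Dict.foldl_insert_getD_add_one_eq_counter, List.foldl_map]
  rw [hcounter, PySem.Dict.items_counter]
  set S := PySem.Set.ofList ks with hS
  set f : String → String × Int := fun k => (k, (ks.count k : Int)) with hf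
  -- A: sorted2 over items with distinct first components = sorted by fst
  have hnd : S.Nodup := PySem.Set.nodup_ofList ks
  have hdisj : ∀ a ∈ S.map f, ∀ b ∈ S.map f, a ≠ b → a.1 ≠ b.1 := by
    intro a ha b hb hab
    rcases List.mem_map.1 ha with ⟨x, _, hxa⟩
    rcases List.mem_map.1 hb with ⟨y, _, hyb⟩
    intro hfst
    apply hab
    rw [← hxa, ← hyb] at hfst ⊢
    simp only [hf] at hfst ⊢
    simp_all
  rw [pv_sorted2_eq_sorted_fst _ hdisj]
  -- A: sorted by fst of S.map f = (sorted S id).map f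
  have hA : PySem.List.sorted (S.map f) (fun p => p.1)
      = (PySem.List.sorted S (fun x => x)).map f := by
    apply PySem.List.sorted_eq_of_perm_of_pairwise_lt
    · exact ((PySem.List.sorted_perm S (fun x => x) false)).map f
    · have := PySem.List.sorted_ofList_pairwise_lt (xs := ks)
      rw [← hS] at this
      exact List.Pairwise.map f (fun a b h => h) this
  rw [hA]
  -- B: runs of sorted ks
  have hpw : (PySem.List.sorted ks (fun k => k)).Pairwise (· ≤ ·) :=
    PySem.List.sorted_pairwise ks (fun k => k)
  rw [pv_runs_eq _ hpw]
  -- Set.ofList (sorted ks) = sorted S id, and counts agree via the permutation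
  have hperm : (PySem.List.sorted ks (fun k => k)).Perm ks :=
    PySem.List.sorted_perm ks (fun k => k) false
  have hofl : PySem.List.sorted S (fun x => x)
      = PySem.Set.ofList (PySem.List.sorted ks (fun k => k)) := by
    apply PySem.List.sorted_eq_of_perm_of_pairwise_lt
    · refine (List.perm_ext_iff_of_nodup (PySem.Set.nodup_ofList _) hnd).2 ?_
      intro a
      simp only [PySem.Set.mem_ofList, hS, PySem.List.mem_sorted]
    · -- Set.ofList of a Pairwise (≤) list is Pairwise (<)
      have : ∀ (m : List String), m.Pairwise (· ≤ ·) →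
          ∀ (acc : List String), acc.Pairwise (· < ·) →
          (∀ a ∈ acc, ∀ x ∈ m, a ≤ x) →
          (m.foldl PySem.Set.add acc).Pairwise (· < ·) := by
        intro m
        induction m with
        | nil => intro _ acc hacc _; simpa using hacc
        | cons x t ihm =>
          intro hm acc hacc hle
          simp only [List.foldl_cons]
          by_cases hx : x ∈ acc
          · have : PySem.Set.add acc x = acc := by simp [PySem.Set.add, PySem.Set.contains, hx]
            rw [this]
            exact ihm hm.of_cons acc hacc (fun a ha y hy => hle a ha y (by simp [hy]))
          · have : PySem.Set.add acc x = acc ++ [x] := by simp [PySem.Set.add, PySem.Set.contains, hx]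
            rw [this]
            refine ihm hm.of_cons _ ?_ ?_
            · rw [List.pairwise_append]
              refine ⟨hacc, by simp, ?_⟩
              intro a ha b hb
              simp at hb
              have hne : a ≠ x := fun h => hx (h ▸ ha)
              rw [hb]
              exact lt_of_le_of_ne (hle a ha x (by simp)) hne
            · intro a ha y hy
              rcases List.mem_append.1 ha with ha | ha
              · exact hle a ha y (by simp [hy])
              · simp at ha; subst ha
                exact List.rel_of_pairwise_cons hm hy
      rw [pv_ofList_eq_foldl_add]
      exact this _ hpw [] (by simp) (by simp)
  rw [hofl]
  apply List.map_congr_left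
  intro x _
  simp [hf, hperm.count_eq]
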